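-- pv_equiv track=rewrite | github.com/getsentry/sentry | src/sentry/replays/endpoints/organization_replay_count.py | get_replay_ids
-- ===== SOURCE A (Python) =====
-- from collections import defaultdict
-- from typing import Any
--
-- MAX_REPLAY_COUNT = 51
--
-- def get_replay_ids(
--     replay_results: Any, replay_ids_mapping: dict[str, list[str]]
-- ) -> dict[str, list[str]]:
--     ret: dict[str, list[str]] = defaultdict(list)
--     for row in replay_results["data"]:
--         identifiers = replay_ids_mapping[row["replay_id"]]
--         for identifier in identifiers:
--             if len(ret[identifier]) < MAX_REPLAY_COUNT:
--                 ret[identifier].append(row["replay_id"])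
--     return ret
-- ===== SOURCE B (Python) =====
-- from collections import defaultdict
--
-- MAX_REPLAY_COUNT = 51
--
-- def get_replay_ids(replay_results, replay_ids_mapping):
--     # Flatten once to a stream of (identifier, replay_id) pairs, then build each
--     # distinct identifier's capped list by filtering that stream per identifier.
--     pairs = [
--         (identifier, row["replay_id"])
--         for row in replay_results["data"]
--         for identifier in replay_ids_mapping[row["replay_id"]]
--     ]
--     ret = defaultdict(list)
--     for identifier in dict.fromkeys(i for i, _ in pairs):
--         ret[identifier] = [rid for i, rid in pairs if i == identifier][:MAX_REPLAY_COUNT]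
--     return ret
-- ===== Notes on version B (the rewrite author's own statement) =====
-- stated objective: alternative
-- what changed: B flattens the input once to a stream of (identifier, replay_id) pairs, then builds each distinct identifier's list (in first-occurrence order via dict.fromkeys) by filtering that stream and slicing to MAX_REPLAY_COUNT, instead of A's incremental capped appends into a dict while looping rows.
import Mathlib
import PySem

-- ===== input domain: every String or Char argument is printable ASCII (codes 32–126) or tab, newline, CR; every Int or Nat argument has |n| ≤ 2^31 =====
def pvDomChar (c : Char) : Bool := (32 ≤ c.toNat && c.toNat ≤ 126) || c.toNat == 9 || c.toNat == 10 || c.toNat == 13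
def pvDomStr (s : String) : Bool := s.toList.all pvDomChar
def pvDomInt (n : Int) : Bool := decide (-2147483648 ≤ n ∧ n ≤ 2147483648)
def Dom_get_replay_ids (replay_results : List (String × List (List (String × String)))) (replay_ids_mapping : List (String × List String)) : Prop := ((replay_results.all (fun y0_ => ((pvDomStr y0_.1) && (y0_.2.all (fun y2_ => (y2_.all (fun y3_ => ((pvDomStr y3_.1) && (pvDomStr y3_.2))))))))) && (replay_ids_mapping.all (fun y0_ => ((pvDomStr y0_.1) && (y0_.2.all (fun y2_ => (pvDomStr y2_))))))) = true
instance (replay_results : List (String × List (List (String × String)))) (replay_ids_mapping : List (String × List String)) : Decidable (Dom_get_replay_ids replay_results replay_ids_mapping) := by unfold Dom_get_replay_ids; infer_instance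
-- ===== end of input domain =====

-- B builds the result by flattening to a stream of (identifier, replay_id) pairs and then,
-- for each distinct identifier in first-occurrence order, filtering that stream and slicing
-- to the cap — instead of A's incremental capped appends into a dict; same result, different
-- decomposition (B is quadratic in the number of distinct identifiers).

-- ===== PORT A =====
-- A's inner-loop body: defaultdict access ret[identifier] (creates [] if missing),
-- then the capped append.
def pvStepA (rid : String) (d : PySem.Dict String (List String)) (identifier : String) :
    PySem.Dict String (List String) :=
  let d1 := d.setdefault identifier []          -- ret[identifier] on a defaultdict(list)
  if (d1.getD identifier []).length < 51 then
    d1.insert identifier (d1.getD identifier [] ++ [rid])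
  else d1

def get_replay_ids (replay_results : List (String × List (List (String × String)))) (replay_ids_mapping : List (String × List String)) : List (String × List String) :=
  let ret := ((PySem.Dict.mk replay_results).getD "data" []).foldl
    (fun d row =>
      let rid := (PySem.Dict.mk row).getD "replay_id" ""
      let identifiers := (PySem.Dict.mk replay_ids_mapping).getD rid []
      identifiers.foldl (pvStepA rid) d)
    PySem.Dict.empty
  ret.items

-- ===== PORT B =====
def get_replay_ids_alt (replay_results : List (String × List (List (String × String)))) (replay_ids_mapping : List (String × List String)) : List (String × List String) :=
  -- pairs = [(identifier, row["replay_id"]) for row in … for identifier in …]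
  let pairs := ((PySem.Dict.mk replay_results).getD "data" []).flatMap (fun row =>
    let rid := (PySem.Dict.mk row).getD "replay_id" ""
    ((PySem.Dict.mk replay_ids_mapping).getD rid []).map (fun identifier => (identifier, rid)))
  -- for identifier in dict.fromkeys(i for i, _ in pairs): ret[identifier] = [...][:51]
  let ret := (PySem.List.dedup (pairs.map (·.1))).foldl
    (fun d identifier =>
      d.insert identifier (((pairs.filter (fun p => p.1 == identifier)).map (·.2)).take 51))
    PySem.Dict.empty
  ret.items

-- ===== PRECONDITION & SPEC =====
-- Pre_ excludes exactly the inputs where Python A raises KeyError: a missing "data" key,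
-- a row without "replay_id", or a replay_id absent from replay_ids_mapping.
def Pre_get_replay_ids (replay_results : List (String × List (List (String × String)))) (replay_ids_mapping : List (String × List String)) : Prop :=
  (PySem.Dict.mk replay_results).contains "data" = true ∧
  ∀ row ∈ (PySem.Dict.mk replay_results).getD "data" [],
    (PySem.Dict.mk row).contains "replay_id" = true ∧
    (PySem.Dict.mk replay_ids_mapping).contains ((PySem.Dict.mk row).getD "replay_id" "") = true
instance (replay_results : List (String × List (List (String × String)))) (replay_ids_mapping : List (String × List String)) : Decidable (Pre_get_replay_ids replay_results replay_ids_mapping) := by unfold Pre_get_replay_ids; infer_instance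

def pvWitness_get_replay_ids : (List (String × List (List (String × String)))) × (List (String × List String)) :=
  ([("data", [[("replay_id", "r1")], [("replay_id", "r2")]])], [("r1", ["i1", "i2"]), ("r2", ["i1"])])

def Spec_get_replay_ids (replay_results : List (String × List (List (String × String)))) (replay_ids_mapping : List (String × List String)) (out : List (String × List String)) : Prop := out = get_replay_ids_alt replay_results replay_ids_mapping
instance (replay_results : List (String × List (List (String × String)))) (replay_ids_mapping : List (String × List String)) (out : List (String × List String)) : Decidable (Spec_get_replay_ids replay_results replay_ids_mapping out) := by unfold Spec_get_replay_ids; infer_instance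

-- ===== CLAIM (what is proved, stated in full; the proofs are below) =====
def Claim_equal_get_replay_ids : Prop := ∀ (replay_results : List (String × List (List (String × String)))) (replay_ids_mapping : List (String × List String)), Dom_get_replay_ids replay_results replay_ids_mapping → Pre_get_replay_ids replay_results replay_ids_mapping → Spec_get_replay_ids replay_results replay_ids_mapping (get_replay_ids replay_results replay_ids_mapping)

-- ===== LEMMAS AND PROOFS =====

-- Characterization of A's dict after folding pvStepA over a flat list of
-- (identifier, replay_id) pairs starting from the empty dict: the keys are the
-- distinct identifiers in first-occurrence order, and each identifier's value is
-- the filtered stream of replay_ids capped at 51 — exactly what B computes per key.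
theorem pvA_char (pairs : List (String × String)) :
    (pairs.foldl (fun d p => pvStepA p.2 d p.1) PySem.Dict.empty).keys
      = PySem.List.dedup (pairs.map (·.1)) ∧
    ∀ k, (pairs.foldl (fun d p => pvStepA p.2 d p.1) PySem.Dict.empty).getD k []
      = ((pairs.filter (fun p => p.1 == k)).map (·.2)).take 51 := by
  induction pairs using List.reverseRecOn with
  | nil => simp [PySem.List.dedup_eq_ofList, PySem.Set.ofList_nil]
  | append_singleton ps p ih =>
    obtain ⟨hk, hv⟩ := ih
    rw [List.foldl_append, List.foldl_cons, List.foldl_nil]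
    set d := ps.foldl (fun d p => pvStepA p.2 d p.1) PySem.Dict.empty with hd
    have hkeys_append : PySem.List.dedup ((ps ++ [p]).map (·.1))
        = if p.1 ∈ ps.map (·.1) then PySem.List.dedup (ps.map (·.1))
          else PySem.List.dedup (ps.map (·.1)) ++ [p.1] := by
      by_cases h : p.1 ∈ ps.map (·.1) <;>
        simp [PySem.List.dedup_eq_ofList, PySem.Set.ofList_append_singleton,
          PySem.Set.mem_ofList, h]
    have hfilt : ∀ k, (ps ++ [p]).filter (fun q => q.1 == k)
        = ps.filter (fun q => q.1 == k) ++ if p.1 = k then [p] else [] := by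
      intro k
      rw [List.filter_append]
      by_cases h : p.1 = k <;> simp [h]
    by_cases hc : d.contains p.1 = true
    · -- p.1 already a key
      have hmem : p.1 ∈ ps.map (·.1) := by
        have := (PySem.Dict.contains_iff_mem_keys d p.1).mp hc
        rw [hk] at this
        simpa [PySem.List.mem_dedup] using this
      have hd1 : d.setdefault p.1 [] = d := PySem.Dict.setdefault_of_contains _ _ hc
      set l := (ps.filter (fun q => q.1 == p.1)).map (·.2) with hl
      have hvp : d.getD p.1 [] = l.take 51 := hv p.1
      by_cases hlen : l.length < 51
      · have htk : l.take 51 = l := List.take_of_length_le (by omega)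
        have hA : pvStepA p.2 d p.1 = d.insert p.1 (l ++ [p.2]) := by
          rw [pvStepA]; simp only [hd1, hvp, htk]; rw [if_pos hlen]
        refine ⟨?_, ?_⟩
        · rw [hA, PySem.Dict.keys_insert_of_contains _ _ hc, hk, hkeys_append, if_pos hmem]
        · intro k
          rw [hA, PySem.Dict.getD_insert, hfilt k]
          by_cases hpk : p.1 = k
          · subst hpk
            rw [if_pos rfl]
            simp only [List.map_append, ← hl]
            simp [List.take_of_length_le (l := l ++ [p.2]) (by simp; omega)]
          · rw [if_neg (fun h => hpk h.symm)]
            simp [hpk, hv k]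
      · have hcond : ¬ (d.getD p.1 []).length < 51 := by
          rw [hvp]; simp only [List.length_take]; omega
        have hA : pvStepA p.2 d p.1 = d := by
          rw [pvStepA]; simp only [hd1, if_neg hcond]
        refine ⟨?_, ?_⟩
        · rw [hA, hk, hkeys_append, if_pos hmem]
        · intro k
          rw [hA, hfilt k]
          by_cases hpk : p.1 = k
          · subst hpk
            rw [if_pos rfl]
            simp only [List.map_append, ← hl]
            rw [List.take_append_of_le_length (by omega)]
            exact hvp
          · simp [hpk, hv k]
    · -- p.1 fresh
      have hc' : d.contains p.1 = false := by simpa using hc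
      have hnmem : p.1 ∉ ps.map (·.1) := by
        intro hmem
        have : p.1 ∈ d.keys := by
          rw [hk]; simpa [PySem.List.mem_dedup] using hmem
        exact absurd ((PySem.Dict.contains_iff_mem_keys d p.1).mpr this) (by simp [hc'])
      have hd1 : d.setdefault p.1 [] = d.insert p.1 [] :=
        PySem.Dict.setdefault_of_not_contains _ _ hc'
      have hA : pvStepA p.2 d p.1 = d.insert p.1 [p.2] := by
        rw [pvStepA]
        simp only [hd1, PySem.Dict.getD_insert_self, List.nil_append,
          PySem.Dict.insert_insert_self]
        rw [if_pos (by simp)]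
      have hfiltp : ps.filter (fun q => q.1 == p.1) = [] := by
        rw [List.filter_eq_nil_iff]
        intro q hq hbe
        exact hnmem (by
          have : q.1 = p.1 := by simpa using hbe
          exact this ▸ List.mem_map_of_mem hq)
      refine ⟨?_, ?_⟩
      · rw [hA, PySem.Dict.keys_insert_of_not_contains _ _ hc', hk, hkeys_append,
          if_neg hnmem]
      · intro k
        rw [hA, PySem.Dict.getD_insert, hfilt k]
        by_cases hpk : p.1 = k
        · subst hpk
          rw [if_pos rfl, hfiltp]
          simp
        · rw [if_neg (fun h => hpk h.symm)]
          simp [hpk, hv k]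

-- Flattening A's nested row/identifier loops into one loop over (identifier, replay_id) pairs.
def pvPairs (replay_results : List (String × List (List (String × String)))) (replay_ids_mapping : List (String × List String)) : List (String × String) :=
  ((PySem.Dict.mk replay_results).getD "data" []).flatMap (fun row =>
    let rid := (PySem.Dict.mk row).getD "replay_id" ""
    ((PySem.Dict.mk replay_ids_mapping).getD rid []).map (fun identifier => (identifier, rid)))

theorem pvFlattenA (replay_results : List (String × List (List (String × String)))) (replay_ids_mapping : List (String × List String)) :
    ((PySem.Dict.mk replay_results).getD "data" []).foldl
      (fun d row =>
        let rid := (PySem.Dict.mk row).getD "replay_id" ""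
        (((PySem.Dict.mk replay_ids_mapping).getD rid []).foldl (pvStepA rid) d))
      PySem.Dict.empty
    = (pvPairs replay_results replay_ids_mapping).foldl (fun d p => pvStepA p.2 d p.1) PySem.Dict.empty := by
  rw [pvPairs, List.foldl_flatMap]
  congr 1; funext d row
  rw [List.foldl_map]

theorem get_replay_ids_eq (replay_results : List (String × List (List (String × String)))) (replay_ids_mapping : List (String × List String)) :
    get_replay_ids replay_results replay_ids_mapping = get_replay_ids_alt replay_results replay_ids_mapping := by
  have halt : get_replay_ids_alt replay_results replay_ids_mapping
      = ((PySem.List.dedup ((pvPairs replay_results replay_ids_mapping).map (·.1))).foldl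
          (fun d identifier => d.insert identifier
            ((((pvPairs replay_results replay_ids_mapping).filter (fun p => p.1 == identifier)).map (·.2)).take 51))
          PySem.Dict.empty).items := rfl
  rw [get_replay_ids, halt]
  simp only [pvFlattenA]
  obtain ⟨hk, hv⟩ := pvA_char (pvPairs replay_results replay_ids_mapping)
  set pairs := pvPairs replay_results replay_ids_mapping with hpairs
  set keys := PySem.List.dedup (pairs.map (·.1)) with hkeys
  have hnd : keys.Nodup := hkeys ▸ PySem.List.nodup_dedup _
  have hBitems := PySem.Dict.items_foldl_insert_fresh (l := keys) (k := fun x => x)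
      (v := fun identifier => (((pairs.filter (fun p => p.1 == identifier)).map (·.2)).take 51))
      (d := PySem.Dict.empty) (fun a _ => PySem.Dict.contains_empty a) (by simpa using hnd)
  simp at hBitems
  rw [hBitems, PySem.Dict.items_eq_map_keys _ (hk ▸ hnd) ([] : List String), hk]
  exact List.map_congr_left (fun k _ => by rw [hv k])

-- ===== VERDICT (by name: the statement is the Claim_ definition above) =====
theorem get_replay_ids_spec : Claim_equal_get_replay_ids := by
  intro replay_results replay_ids_mapping _ _
  unfold Spec_get_replay_ids
  exact get_replay_ids_eq replay_results replay_ids_mapping
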